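-- pv_equiv track=rewrite | github.com/ALbum3270/DeepTrace | src/core/verification/provenance.py | _is_critical_context
-- ===== SOURCE A (Python) =====
-- def _is_critical_context(content: str) -> bool:
--     """
--     Detects if the content is critical, skeptical, or negative about the source.
--     Used to prevent 'According to OpenAI' from boosting score when the article is actually debunking it.
--     """
--     skeptic_markers = [
--         "but", "however", "although", "claimed", "alleged",
--         "skeptical", "doubts", "flaws", "failed to", "contradicts",
--         "exaggerated", "hype", "rumor", "unverified"
--     ]
--     # Simple proximity check: if "according to" is near "however/but/false"
--     content_lower = content.lower()
--     if any(m in content_lower for m in skeptic_markers):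
--         return True
--     return False
-- ===== SOURCE B (Python) =====
-- import re
--
-- # One precompiled alternation of all 14 marker literals: a single multi-pattern
-- # scan over the lowercased content instead of 14 independent substring scans.
-- _SKEPTIC_RE = re.compile(
--     "but|however|although|claimed|alleged|skeptical|doubts|flaws|failed to|"
--     "contradicts|exaggerated|hype|rumor|unverified"
-- )
--
-- def _is_critical_context(content: str) -> bool:
--     return _SKEPTIC_RE.search(content.lower()) is not None
-- ===== Notes on version B (the rewrite author's own statement) =====
-- stated objective: idiomatic
-- what changed: Replaces 14 independent per-marker substring scans with one precompiled regex alternation searched in a single left-to-right pass over the lowercased content.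
import Mathlib
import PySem

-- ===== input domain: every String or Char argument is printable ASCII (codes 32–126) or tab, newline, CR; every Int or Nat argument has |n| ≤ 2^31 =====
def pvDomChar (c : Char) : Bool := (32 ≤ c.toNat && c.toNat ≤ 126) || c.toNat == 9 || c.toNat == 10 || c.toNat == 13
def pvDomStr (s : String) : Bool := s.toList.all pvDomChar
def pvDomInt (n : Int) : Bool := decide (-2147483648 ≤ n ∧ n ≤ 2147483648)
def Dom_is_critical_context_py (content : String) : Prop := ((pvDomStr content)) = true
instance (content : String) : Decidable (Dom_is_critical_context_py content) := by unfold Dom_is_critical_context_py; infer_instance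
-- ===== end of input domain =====

-- B replaces A's 14 independent substring scans by one combined alternation scanned
-- in a single left-to-right pass over the lowercased content (Python: one precompiled regex).

-- ===== PORT A =====
-- A's marker list, in source order
def pvSkepticMarkers : List String :=
  ["but", "however", "although", "claimed", "alleged",
   "skeptical", "doubts", "flaws", "failed to", "contradicts",
   "exaggerated", "hype", "rumor", "unverified"]

def is_critical_context_py (content : String) : Bool :=
  let content_lower := PySem.Str.lower content
  if pvSkepticMarkers.any (fun m => PySem.Str.isIn m content_lower) then true else false

-- ===== PORT B =====
-- B's regex alternation, as the list of its literal alternatives (char lists)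
def pvAlts : List (List Char) :=
  ["but", "however", "although", "claimed", "alleged",
   "skeptical", "doubts", "flaws", "failed to", "contradicts",
   "exaggerated", "hype", "rumor", "unverified"].map String.toList

-- re.search of the alternation: at each position try every alternative, else advance.
-- Exact for this regex (plain literals, no metacharacters): matches iff some
-- alternative occurs starting at some position.
def pvScan (cs : List Char) : Bool :=
  match cs with
  | [] => false
  | c :: rest => pvAlts.any (fun p => p.isPrefixOf (c :: rest)) || pvScan rest

def is_critical_context_py_alt (content : String) : Bool :=
  pvScan (PySem.Chars.lower content.toList)

-- ===== PRECONDITION & SPEC =====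
def Spec_is_critical_context_py (content : String) (out : Bool) : Prop := out = is_critical_context_py_alt content
instance (content : String) (out : Bool) : Decidable (Spec_is_critical_context_py content out) := by unfold Spec_is_critical_context_py; infer_instance

-- ===== CLAIM (what is proved, stated in full; the proofs are below) =====
def Claim_equal_is_critical_context_py : Prop := ∀ (content : String), Dom_is_critical_context_py content → Spec_is_critical_context_py content (is_critical_context_py content)

-- ===== LEMMAS AND PROOFS =====

-- The single-pass scan finds exactly the inputs having some alternative as an infix.
lemma pvScan_eq_any_infix (cs : List Char) :
    pvScan cs = pvAlts.any (fun p => decide (p <:+: cs)) := by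
  induction cs with
  | nil => decide
  | cons c rest ih =>
    rw [pvScan, ih, Bool.eq_iff_iff]
    simp only [Bool.or_eq_true, List.any_eq_true, List.isPrefixOf_iff_prefix,
      decide_eq_true_eq, List.infix_cons_iff]
    constructor
    · rintro (⟨p, hp, h⟩ | ⟨p, hp, h⟩)
      · exact ⟨p, hp, Or.inl h⟩
      · exact ⟨p, hp, Or.inr h⟩
    · rintro ⟨p, hp, h | h⟩
      · exact Or.inl ⟨p, hp, h⟩
      · exact Or.inr ⟨p, hp, h⟩

theorem pv_main (content : String) :
    is_critical_context_py content = is_critical_context_py_alt content := by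
  rw [is_critical_context_py, is_critical_context_py_alt, pvScan_eq_any_infix,
    Bool.eq_iff_iff]
  simp only [Bool.if_true_left, Bool.or_eq_true, List.any_eq_true, Bool.false_eq_true, or_false,
    decide_eq_true_eq, PySem.Str.isIn, PySem.Str.toList_lower, pvSkepticMarkers,
    pvAlts, List.mem_map, PySem.Chars.isIn_iff_infix]
  constructor
  · rintro ⟨m, hm, h⟩; exact ⟨m.toList, ⟨m, hm, rfl⟩, h⟩
  · rintro ⟨p, ⟨m, hm, rfl⟩, h⟩; exact ⟨m, hm, h⟩

-- ===== VERDICT (by name: the statement is the Claim_ definition above) =====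
theorem is_critical_context_py_spec : Claim_equal_is_critical_context_py := by
  intro content _
  exact pv_main content
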